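-- pv_equiv track=rewrite | github.com/aenealabs/aura | src/services/airgap/edge_runtime.py | generate
-- ===== SOURCE A (Python) =====
-- def generate(
--
--     prompt: str,
--     max_tokens: int = 256,
--     temperature: float = 0.7,
--     top_p: float = 0.9,
--     top_k: int = 40,
-- ) -> tuple[str, int, float]:
--     """Generate text (mock implementation).
--
--     Returns:
--         Tuple of (generated_text, tokens_generated, time_ms)
--     """
--     # Simulate generation
--     words = ["The", "quick", "brown", "fox", "jumps", "over", "the", "lazy", "dog"]
--     response_words = []
--     for i in range(min(max_tokens // 2, 50)):
--         response_words.append(words[i % len(words)])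
--
--     response = " ".join(response_words)
--     tokens = len(response_words)
--     time_ms = tokens * 10  # Simulate 10ms per token
--
--     return response, tokens, time_ms
-- ===== SOURCE B (Python) =====
-- # Canned words are fixed, so the whole output is a closed form in n = clamped token count:
-- # no word list is ever built.
-- _WORDS = ["The", "quick", "brown", "fox", "jumps", "over", "the", "lazy", "dog"]
-- _CYCLE = " ".join(_WORDS)                                   # one full 9-word cycle
-- _PREFIX = [" ".join(_WORDS[:r]) for r in range(len(_WORDS))]  # partial cycles
--
--
-- def generate(
--     prompt: str,
--     max_tokens: int = 256,
--     temperature: float = 0.7,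
--     top_p: float = 0.9,
--     top_k: int = 40,
-- ) -> tuple[str, int, float]:
--     """Generate text (mock implementation): closed-form string assembly."""
--     n = max(min(max_tokens // 2, 50), 0)
--     q, r = divmod(n, len(_WORDS))
--     response = " ".join([_CYCLE] * q + ([_PREFIX[r]] if r else []))
--     return response, n, n * 10
-- ===== Notes on version B (the rewrite author's own statement) =====
-- stated objective: simpler
-- what changed: B builds no word list at all: it clamps n = max(min(max_tokens // 2, 50), 0), returns tokens and time arithmetically as n and 10*n, and assembles the response string in closed form from divmod(n, 9) using a precomputed full-cycle string and a partial-cycle prefix table, instead of A's loop appending words[i % len(words)] and joining.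
import Mathlib
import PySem

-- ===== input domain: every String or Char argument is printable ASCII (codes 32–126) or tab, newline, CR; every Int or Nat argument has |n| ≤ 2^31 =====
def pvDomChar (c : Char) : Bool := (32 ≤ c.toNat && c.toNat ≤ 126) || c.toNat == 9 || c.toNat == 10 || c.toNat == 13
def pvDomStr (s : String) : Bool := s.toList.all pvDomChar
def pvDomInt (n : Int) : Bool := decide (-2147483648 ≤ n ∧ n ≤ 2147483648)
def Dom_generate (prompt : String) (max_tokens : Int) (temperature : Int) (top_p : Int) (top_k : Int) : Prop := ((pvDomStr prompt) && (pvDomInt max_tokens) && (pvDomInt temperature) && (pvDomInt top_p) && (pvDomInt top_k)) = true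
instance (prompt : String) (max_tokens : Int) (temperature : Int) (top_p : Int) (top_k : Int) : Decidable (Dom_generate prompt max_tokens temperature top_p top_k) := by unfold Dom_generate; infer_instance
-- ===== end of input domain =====

-- B never builds a word list: token count and time are computed arithmetically from the clamped
-- n, and the response string is assembled in closed form from divmod(n, 9) over a precomputed
-- full-cycle string and a partial-cycle prefix table; same output, plainer (string-level) construction.

-- ===== PORT A =====
def pvWords : List String := ["The", "quick", "brown", "fox", "jumps", "over", "the", "lazy", "dog"]

def generate (prompt : String) (max_tokens : Int) (temperature : Int) (top_p : Int) (top_k : Int) : String × Int × Int :=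
  let words := pvWords
  let response_words :=
    (PySem.List.pyRange 0 (min (PySem.Int.floordiv max_tokens 2) 50) 1).foldl
      (fun acc i => acc ++ [PySem.List.pyGetD words (PySem.Int.mod i (words.length : Int)) ""]) []
  let response := PySem.Str.join " " response_words
  let tokens : Int := (response_words.length : Int)
  let time_ms : Int := tokens * 10
  (response, tokens, time_ms)

-- ===== PORT B =====
def pvCycle : String := PySem.Str.join " " pvWords
def pvPrefix : List String := (List.range pvWords.length).map (fun r => PySem.Str.join " " (pvWords.take r))

def generate_alt (prompt : String) (max_tokens : Int) (temperature : Int) (top_p : Int) (top_k : Int) : String × Int × Int :=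
  let n : Int := max (min (PySem.Int.floordiv max_tokens 2) 50) 0
  -- divmod(n, len(_WORDS)); the divisor 9 ≠ 0, so divmod? is always some
  let qr := (PySem.Int.divmod? n (pvWords.length : Int)).getD (0, 0)
  let q := qr.1
  let r := qr.2
  let response := PySem.Str.join " "
    (PySem.List.pyRepeat [pvCycle] q ++ (if r ≠ 0 then [PySem.List.pyGetD pvPrefix r ""] else []))
  (response, n, n * 10)

-- ===== PRECONDITION & SPEC =====
def Spec_generate (prompt : String) (max_tokens : Int) (temperature : Int) (top_p : Int) (top_k : Int) (out : String × Int × Int) : Prop := out = generate_alt prompt max_tokens temperature top_p top_k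
instance (prompt : String) (max_tokens : Int) (temperature : Int) (top_p : Int) (top_k : Int) (out : String × Int × Int) : Decidable (Spec_generate prompt max_tokens temperature top_p top_k out) := by unfold Spec_generate; infer_instance

-- ===== CLAIM (what is proved, stated in full; the proofs are below) =====
def Claim_equal_generate : Prop := ∀ (prompt : String) (max_tokens : Int) (temperature : Int) (top_p : Int) (top_k : Int), Dom_generate prompt max_tokens temperature top_p top_k → Spec_generate prompt max_tokens temperature top_p top_k (generate prompt max_tokens temperature top_p top_k)

-- ===== LEMMAS AND PROOFS =====

-- A's result as a function of the clamped token count k = max(min(max_tokens // 2, 50), 0)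
def pvCoreA (k : Nat) : String × Int × Int :=
  let response_words :=
    (PySem.List.pyRange 0 (k : Int) 1).foldl
      (fun acc i => acc ++ [PySem.List.pyGetD pvWords (PySem.Int.mod i (pvWords.length : Int)) ""]) []
  (PySem.Str.join " " response_words, (response_words.length : Int), (response_words.length : Int) * 10)

-- B's result as a function of the same k
def pvCoreB (k : Nat) : String × Int × Int :=
  let n : Int := (k : Int)
  let qr := (PySem.Int.divmod? n (pvWords.length : Int)).getD (0, 0)
  let response := PySem.Str.join " "
    (PySem.List.pyRepeat [pvCycle] qr.1 ++ (if qr.2 ≠ 0 then [PySem.List.pyGetD pvPrefix qr.2 ""] else []))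
  (response, n, n * 10)

set_option maxRecDepth 8000 in
set_option maxHeartbeats 2000000 in
lemma pvCore_eq : ∀ k : Nat, k ≤ 50 → pvCoreA k = pvCoreB k := by decide

lemma pvA_eq_core (prompt : String) (max_tokens temperature top_p top_k : Int) :
    generate prompt max_tokens temperature top_p top_k
      = pvCoreA (max (min (PySem.Int.floordiv max_tokens 2) 50) 0).toNat := by
  unfold generate pvCoreA
  have h : PySem.List.pyRange 0 (min (PySem.Int.floordiv max_tokens 2) 50) 1
      = PySem.List.pyRange 0 ((max (min (PySem.Int.floordiv max_tokens 2) 50) 0).toNat : Int) 1 := by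
    rcases le_or_gt (min (PySem.Int.floordiv max_tokens 2) 50) 0 with h0 | h0
    · rw [PySem.List.pyRange_one_eq_nil h0, PySem.List.pyRange_one_eq_nil]
      omega
    · congr 1
      omega
  rw [h]

lemma pvB_eq_core (prompt : String) (max_tokens temperature top_p top_k : Int) :
    generate_alt prompt max_tokens temperature top_p top_k
      = pvCoreB (max (min (PySem.Int.floordiv max_tokens 2) 50) 0).toNat := by
  unfold generate_alt pvCoreB
  have h : ((max (min (PySem.Int.floordiv max_tokens 2) 50) 0).toNat : Int)
      = max (min (PySem.Int.floordiv max_tokens 2) 50) 0 := by omega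
  rw [h]

-- ===== VERDICT (by name: the statement is the Claim_ definition above) =====
theorem generate_spec : Claim_equal_generate := by
  intro prompt max_tokens temperature top_p top_k _
  unfold Spec_generate
  rw [pvA_eq_core, pvB_eq_core]
  exact pvCore_eq _ (by omega)
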